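-- pv_equiv track=rewrite | github.com/LeeChanghoJJang/Algorithm-Study | 11~20회차/16회차/programmers_72411_메뉴리뉴얼/programmers_72411_이창호.py | solution
-- ===== SOURCE A (Python) =====
-- from itertools import combinations
--
-- def solution(orders, course):
--     order_dict = {}
--     max_len = {i: 0 for i in course}
--     for length in course:
--         for cook in orders:
--             for a in combinations(cook, length):
--                 b = ''.join(sorted(a))
--                 if b not in order_dict:
--                     order_dict[b] = 1
--                 else:
--                     order_dict[b] += 1
--                     lens = len(b)
--                     if max_len[lens] < order_dict[b]:
--                         max_len[lens] = order_dict[b]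
--
--     result = sorted(filter(lambda x: order_dict[x] >= 2, order_dict.keys()))
--
--     total_result = []
--     for i in result:
--         if max_len[len(i)] == order_dict[i]:
--             total_result.append(i)
--     return total_result
-- ===== SOURCE B (Python) =====
-- from itertools import combinations
--
-- def solution(orders, course):
--     combos = [''.join(sorted(c))
--               for length in course
--               for cook in orders
--               for c in combinations(cook, length)]
--     cnt = {}
--     for b in combos:
--         cnt[b] = cnt.get(b, 0) + 1
--     return sorted(k for k, c in cnt.items()
--                   if c >= 2 and all(c2 <= c for k2, c2 in cnt.items()
--                                     if len(k2) == len(k)))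
-- ===== Notes on version B (the rewrite author's own statement) =====
-- stated objective: simpler
-- what changed: B flattens A's fused triple loop into a plain comprehension over all combination strings, counts them in one pass, and replaces A's incrementally-maintained per-length maximum dictionary by a direct 'count>=2 and no same-length key counts higher' filter over the counter, sorting only the final answer.
import Mathlib
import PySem

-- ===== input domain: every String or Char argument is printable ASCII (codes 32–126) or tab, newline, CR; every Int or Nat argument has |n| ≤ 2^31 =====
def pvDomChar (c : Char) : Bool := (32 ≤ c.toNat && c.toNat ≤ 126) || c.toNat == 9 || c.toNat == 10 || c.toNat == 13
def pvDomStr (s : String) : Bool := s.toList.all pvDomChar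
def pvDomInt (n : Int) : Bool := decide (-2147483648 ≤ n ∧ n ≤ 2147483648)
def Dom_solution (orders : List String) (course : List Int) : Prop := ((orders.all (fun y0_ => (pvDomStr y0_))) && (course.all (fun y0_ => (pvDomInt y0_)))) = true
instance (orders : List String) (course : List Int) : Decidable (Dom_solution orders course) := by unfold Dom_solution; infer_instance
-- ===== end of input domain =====

-- B replaces A's fused triple loop (count + running per-length maxima) by a flat generation pass,
-- a one-pass counter, and a direct "count ≥ 2 and no same-length key counts higher" filter (simpler; not faster).

-- ===== PORT A =====
-- A's inner loop body (the code inside `for a in combinations(cook, length):`), named so the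
-- proofs can refer to it; st = (order_dict, max_len)
def pvStepA (st : PySem.Dict String Int × PySem.Dict Int Int) (a : List Char) :
    PySem.Dict String Int × PySem.Dict Int Int :=
  let b : String := String.ofList (PySem.List.sorted a (fun x => x) false)   -- b = ''.join(sorted(a))
  if ! st.1.contains b then
    (st.1.insert b 1, st.2)
  else
    let c : Int := st.1.getD b 0 + 1            -- order_dict[b] += 1 (key present here)
    let lens : Int := PySem.Str.len b
    if st.2.getD lens 0 < c then               -- max_len[lens] < order_dict[b] (key present: lens ∈ course)
      (st.1.insert b c, st.2.insert lens c)
    else (st.1.insert b c, st.2)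

def solution (orders : List String) (course : List Int) : List String :=
  -- order_dict = {} ; max_len = {i: 0 for i in course}
  let maxLen0 : PySem.Dict Int Int := course.foldl (fun d i => d.insert i 0) PySem.Dict.empty
  -- the fused triple loop, state = (order_dict, max_len)
  let st : PySem.Dict String Int × PySem.Dict Int Int :=
    course.foldl (fun st length =>
      orders.foldl (fun st cook =>
        (PySem.List.combinations cook.toList length.toNat).foldl pvStepA st) st)
      (PySem.Dict.empty, maxLen0)
  -- result = sorted(filter(lambda x: order_dict[x] >= 2, order_dict.keys()))
  let result := PySem.List.sorted (st.1.keys.filter (fun x => decide (2 ≤ st.1.getD x 0))) (fun x => x) false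
  -- total_result loop
  result.foldl (fun acc i => if st.2.getD (PySem.Str.len i) 0 == st.1.getD i 0 then acc ++ [i] else acc) []

-- ===== PORT B =====
-- combos = [''.join(sorted(c)) for length in course for cook in orders for c in combinations(cook, length)]
def pvCombos (orders : List String) (course : List Int) : List String :=
  course.flatMap (fun length =>
    orders.flatMap (fun cook =>
      (PySem.List.combinations cook.toList length.toNat).map
        (fun c => String.ofList (PySem.List.sorted c (fun x => x) false))))

def solution_alt (orders : List String) (course : List Int) : List String :=
  let combos := pvCombos orders course
  -- cnt = {}; for b in combos: cnt[b] = cnt.get(b, 0) + 1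
  let cnt : PySem.Dict String Int := combos.foldl (fun d b => d.insert b (d.getD b 0 + 1)) PySem.Dict.empty
  -- sorted(k for k, c in cnt.items() if c >= 2 and all(c2 <= c for k2, c2 in cnt.items() if len(k2) == len(k)))
  PySem.List.sorted
    ((cnt.items.filter (fun kc =>
        decide (2 ≤ kc.2) &&
        (cnt.items.filter (fun kc2 => PySem.Str.len kc2.1 == PySem.Str.len kc.1)).all
          (fun kc2 => decide (kc2.2 ≤ kc.2)))).map (fun kc => kc.1))
    (fun x => x) false

-- ===== PRECONDITION & SPEC =====
-- Pre_ excludes exactly the inputs where Python raises: a negative course length makes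
-- itertools.combinations raise ValueError (in A and in B alike).
def Pre_solution (orders : List String) (course : List Int) : Prop := ∀ c ∈ course, 0 ≤ c
instance (orders : List String) (course : List Int) : Decidable (Pre_solution orders course) := by unfold Pre_solution; infer_instance
def pvWitness_solution : List String × List Int := (["ABCFG", "AC", "CDE"], [2, 3])

def Spec_solution (orders : List String) (course : List Int) (out : List String) : Prop := out = solution_alt orders course
instance (orders : List String) (course : List Int) (out : List String) : Decidable (Spec_solution orders course out) := by unfold Spec_solution; infer_instance

-- ===== CLAIM (what is proved, stated in full; the proofs are below) =====
def Claim_equal_solution : Prop := ∀ (orders : List String) (course : List Int), Dom_solution orders course → Pre_solution orders course → Spec_solution orders course (solution orders course)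

-- ===== LEMMAS AND PROOFS =====

-- the maximum (0 if none) of the multiplicities >= 2 among keys of length L: what A's max_len tracks
def pvMx (p : List String) (L : Int) : Int :=
  ((p.toFinset.filter (fun k => (PySem.Str.len k = L) ∧ 2 ≤ p.count k)).sup (fun k => p.count k) : ℕ)

-- A's loop body with the key already joined (the flattened form of A's inner body)
def pvStep (st : PySem.Dict String Int × PySem.Dict Int Int) (b : String) :
    PySem.Dict String Int × PySem.Dict Int Int :=
  if ! st.1.contains b then
    (st.1.insert b 1, st.2)
  else
    let c : Int := st.1.getD b 0 + 1
    let lens : Int := PySem.Str.len b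
    if st.2.getD lens 0 < c then (st.1.insert b c, st.2.insert lens c)
    else (st.1.insert b c, st.2)

theorem pvFlatten (orders : List String) (course : List Int)
    (init : PySem.Dict String Int × PySem.Dict Int Int) :
    course.foldl (fun st length =>
      orders.foldl (fun st cook =>
        (PySem.List.combinations cook.toList length.toNat).foldl pvStepA st) st) init =
      (pvCombos orders course).foldl pvStep init := by
  have hb : pvStepA = (fun st a =>
      pvStep st (String.ofList (PySem.List.sorted a (fun x => x) false))) := by
    funext st a; rfl
  rw [hb]
  simp [pvCombos, List.foldl_flatMap, List.foldl_map]

theorem pvCounter_snoc (p : List String) (x : String) :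
    PySem.Dict.counter (p ++ [x]) =
      (PySem.Dict.counter p).insert x ((PySem.Dict.counter p).getD x 0 + 1) := by
  rw [← PySem.Dict.foldl_insert_getD_add_one_eq_counter, ← PySem.Dict.foldl_insert_getD_add_one_eq_counter,
    List.foldl_append]
  simp

theorem pvMaxLen0_get? (course : List Int) (L : Int) :
    (course.foldl (fun d i => d.insert i 0) (PySem.Dict.empty : PySem.Dict Int Int)).get? L =
      if L ∈ course then some 0 else none := by
  have H : ∀ (cs : List Int) (d : PySem.Dict Int Int),
      (cs.foldl (fun d i => d.insert i 0) d).get? L = if L ∈ cs then some 0 else d.get? L := by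
    intro cs
    induction cs with
    | nil => intro d; simp
    | cons i cs ih =>
      intro d
      simp only [List.foldl_cons, ih, List.mem_cons]
      by_cases h : L = i
      · subst h
        by_cases h2 : L ∈ cs <;> simp [h2, PySem.Dict.get?_insert_self]
      · by_cases h2 : L ∈ cs <;> simp [h2, h, PySem.Dict.get?_insert_of_ne _ _ h]
  rw [H]
  simp

theorem pvCombos_len_mem (orders : List String) (course : List Int)
    (hpre : Pre_solution orders course) :
    ∀ b ∈ pvCombos orders course, (PySem.Str.len b) ∈ course := by
  intro b hb
  simp only [pvCombos, List.mem_flatMap, List.mem_map] at hb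
  obtain ⟨L, hL, cook, _, c, hc, rfl⟩ := hb
  have hlen : c.length = L.toNat := PySem.List.length_of_mem_combinations hc
  have : PySem.Str.len (String.ofList (PySem.List.sorted c (fun x => x) false)) = L := by
    rw [PySem.Str.len_eq]
    simp [PySem.List.length_sorted, hlen, Int.toNat_of_nonneg (hpre L hL)]
  rw [this]; exact hL

theorem pvSorted_filter (M : List String) (pr : String → Bool) :
    PySem.List.sorted ((PySem.Set.ofList M).filter pr) (fun x => x) false =
      (PySem.List.sorted (PySem.Set.ofList M) (fun x => x) false).filter pr := by
  apply PySem.List.sorted_eq_of_perm_of_pairwise_lt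
  · exact (PySem.List.sorted_perm _ _ _).filter pr
  · exact (PySem.List.sorted_ofList_pairwise_lt M).sublist List.filter_sublist

theorem count_snoc_ne (p : List String) (x k : String) (h : k ≠ x) :
    (p ++ [x]).count k = p.count k := by
  simp [List.count_append, List.count_singleton, Ne.symm h]

theorem pvMx_snoc_not_mem (p : List String) (x : String) (hx : x ∉ p) (L : Int) :
    pvMx (p ++ [x]) L = pvMx p L := by
  unfold pvMx
  have ht : (p ++ [x]).toFinset = insert x p.toFinset := by
    simp [List.toFinset_append]
  rw [ht]
  have hcx : (p ++ [x]).count x = 1 := by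
    simp [List.count_append, List.count_eq_zero_of_not_mem hx]
  rw [Finset.filter_insert]
  rw [if_neg (by simp [hcx])]
  congr 1
  have hfe : Finset.filter (fun k => (PySem.Str.len k = L) ∧ 2 ≤ (p ++ [x]).count k) p.toFinset =
      Finset.filter (fun k => (PySem.Str.len k = L) ∧ 2 ≤ p.count k) p.toFinset := by
    apply Finset.filter_congr
    intro k hk
    have hne : k ≠ x := by rintro rfl; exact hx (List.mem_toFinset.mp hk)
    rw [count_snoc_ne p x k hne]
  rw [hfe]
  apply Finset.sup_congr rfl
  intro k hk
  have hk' := Finset.mem_filter.mp hk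
  have hne : k ≠ x := by rintro rfl; exact hx (List.mem_toFinset.mp hk'.1)
  rw [count_snoc_ne p x k hne]

theorem pvMx_snoc_ne (p : List String) (x : String) (L : Int) (hL : L ≠ PySem.Str.len x) :
    pvMx (p ++ [x]) L = pvMx p L := by
  unfold pvMx
  have ht : (p ++ [x]).toFinset = insert x p.toFinset := by
    simp [List.toFinset_append]
  rw [ht, Finset.filter_insert, if_neg (by simp; intro h; exact absurd h.symm hL)]
  have hfe : Finset.filter (fun k => (PySem.Str.len k = L) ∧ 2 ≤ (p ++ [x]).count k) p.toFinset =
      Finset.filter (fun k => (PySem.Str.len k = L) ∧ 2 ≤ p.count k) p.toFinset := by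
    apply Finset.filter_congr
    intro k hk
    by_cases hne : k = x
    · subst hne; constructor <;> (rintro ⟨h1, h2⟩; exact absurd h1.symm hL)
    · rw [count_snoc_ne p x k hne]
  rw [hfe]
  congr 1
  apply Finset.sup_congr rfl
  intro k hk
  have hk' := Finset.mem_filter.mp hk
  have hne : k ≠ x := by rintro rfl; exact hL hk'.2.1.symm
  rw [count_snoc_ne p x k hne]

theorem pvMx_snoc_mem (p : List String) (x : String) (hx : x ∈ p) :
    pvMx (p ++ [x]) (PySem.Str.len x) = max (pvMx p (PySem.Str.len x)) ((p.count x : Int) + 1) := by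
  unfold pvMx
  have ht : (p ++ [x]).toFinset = p.toFinset := by
    simp [List.toFinset_append, Finset.insert_eq_self.mpr (List.mem_toFinset.mpr hx)]
  rw [ht]
  have hcx : (p ++ [x]).count x = p.count x + 1 := by simp [List.count_append]
  -- split p.toFinset at x
  have hsplit : p.toFinset = insert x (p.toFinset.erase x) :=
    (Finset.insert_erase (List.mem_toFinset.mpr hx)).symm
  have hoff : ∀ k ∈ p.toFinset.erase x,
      ((PySem.Str.len k = PySem.Str.len x ∧ 2 ≤ (p ++ [x]).count k) ↔
        (PySem.Str.len k = PySem.Str.len x ∧ 2 ≤ p.count k)) ∧ (p ++ [x]).count k = p.count k := by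
    intro k hk
    have hne : k ≠ x := (Finset.mem_erase.mp hk).1
    rw [count_snoc_ne p x k hne]
    exact ⟨Iff.rfl, rfl⟩
  have hVeq : Finset.sup (Finset.filter (fun k => (PySem.Str.len k = PySem.Str.len x) ∧ 2 ≤ (p ++ [x]).count k) (p.toFinset.erase x)) (fun k => (p ++ [x]).count k) =
      Finset.sup (Finset.filter (fun k => (PySem.Str.len k = PySem.Str.len x) ∧ 2 ≤ p.count k) (p.toFinset.erase x)) (fun k => p.count k) := by
    rw [Finset.filter_congr (fun k hk => (hoff k hk).1)]
    apply Finset.sup_congr rfl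
    intro k hk
    exact (hoff k (Finset.mem_filter.mp hk).1).2
  conv_lhs => rw [hsplit]
  conv_rhs => rw [hsplit]
  rw [Finset.filter_insert, Finset.filter_insert]
  rw [if_pos (⟨rfl, by rw [hcx]; have := List.count_pos_iff.mpr hx; omega⟩ : _ ∧ _)]
  rw [Finset.sup_insert, hVeq, hcx]
  by_cases hpx : 2 ≤ p.count x
  · rw [if_pos ⟨rfl, hpx⟩, Finset.sup_insert]
    simp only [Nat.max_eq_max, Nat.cast_max]
    omega
  · rw [if_neg (by rintro ⟨-, h⟩; exact hpx h)]
    simp only [Nat.max_eq_max, Nat.cast_max]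
    omega

theorem pvMx_ge (M : List String) (k : String) (hk : k ∈ M) (h2 : 2 ≤ M.count k) :
    (M.count k : Int) ≤ pvMx M (PySem.Str.len k) := by
  unfold pvMx
  have hmem : k ∈ M.toFinset.filter (fun j => (PySem.Str.len j = PySem.Str.len k) ∧ 2 ≤ M.count j) :=
    Finset.mem_filter.mpr ⟨List.mem_toFinset.mpr hk, rfl, h2⟩
  exact_mod_cast Finset.le_sup (f := fun j => M.count j) hmem

theorem pvMx_le (M : List String) (L : Int) (c : ℕ)
    (h : ∀ j ∈ M, PySem.Str.len j = L → M.count j ≤ c) : pvMx M L ≤ (c : Int) := by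
  unfold pvMx
  have : (M.toFinset.filter (fun k => (PySem.Str.len k = L) ∧ 2 ≤ M.count k)).sup
      (fun k => M.count k) ≤ c := by
    apply Finset.sup_le
    intro j hj
    have hj' := Finset.mem_filter.mp hj
    exact h j (List.mem_toFinset.mp hj'.1) hj'.2.1
  exact_mod_cast this

theorem pvPoint (M : List String) (k : String) (hk : k ∈ M) (h2 : 2 ≤ M.count k) :
    (pvMx M (PySem.Str.len k) = (M.count k : Int)) ↔
      (∀ j ∈ M, PySem.Str.len j = PySem.Str.len k → M.count j ≤ M.count k) := by
  constructor
  · intro heq j hj hlen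
    by_cases hj2 : 2 ≤ M.count j
    · have := pvMx_ge M j hj hj2
      rw [hlen, heq] at this
      exact_mod_cast this
    · omega
  · intro hall
    have h1 : (M.count k : Int) ≤ pvMx M (PySem.Str.len k) := pvMx_ge M k hk h2
    have h2' : pvMx M (PySem.Str.len k) ≤ (M.count k : Int) :=
      pvMx_le M (PySem.Str.len k) (M.count k) hall
    omega

theorem pvLoop_inv (course : List Int) (M : List String)
    (hlen : ∀ x ∈ M, (PySem.Str.len x) ∈ course) :
    ∀ (p : List String) (m : PySem.Dict Int Int),
      (∀ L : Int, m.get? L = if L ∈ course then some (pvMx p L) else none) →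
      (M.foldl pvStep (PySem.Dict.counter p, m)).1 = PySem.Dict.counter (p ++ M) ∧
      (∀ L : Int, (M.foldl pvStep (PySem.Dict.counter p, m)).2.get? L =
        if L ∈ course then some (pvMx (p ++ M) L) else none) := by
  induction M with
  | nil => intro p m hm; exact ⟨by simp, by simpa using hm⟩
  | cons x M ih =>
    intro p m hm
    have hlenx : PySem.Str.len x ∈ course := hlen x (List.mem_cons_self ..)
    have hlen' : ∀ y ∈ M, PySem.Str.len y ∈ course := fun y hy => hlen y (List.mem_cons_of_mem _ hy)
    -- compute one step
    have hstep : pvStep (PySem.Dict.counter p, m) x =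
        (PySem.Dict.counter (p ++ [x]),
         if x ∈ p then
           (if m.getD (PySem.Str.len x) 0 < (p.count x : Int) + 1
            then m.insert (PySem.Str.len x) ((p.count x : Int) + 1) else m)
         else m) := by
      unfold pvStep
      by_cases hx : x ∈ p
      · have hc : (PySem.Dict.counter p).contains x = true := by
          rw [PySem.Dict.contains_counter]; exact List.elem_eq_true_of_mem hx
        rw [pvCounter_snoc]
        simp [hc, hx, PySem.Dict.getD_counter]
        split_ifs <;> rfl
      · have hc : (PySem.Dict.counter p).contains x = false := by
          rw [PySem.Dict.contains_counter]
          simp [hx]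
        rw [pvCounter_snoc]
        simp [hc, hx, PySem.Dict.getD_counter, List.count_eq_zero_of_not_mem hx]
    -- the new m satisfies the invariant for p ++ [x]
    have hm' : ∀ L : Int,
        (if x ∈ p then
           (if m.getD (PySem.Str.len x) 0 < (p.count x : Int) + 1
            then m.insert (PySem.Str.len x) ((p.count x : Int) + 1) else m)
         else m).get? L = if L ∈ course then some (pvMx (p ++ [x]) L) else none := by
      intro L
      by_cases hx : x ∈ p
      · simp only [if_pos hx]
        have hget : m.getD (PySem.Str.len x) 0 = pvMx p (PySem.Str.len x) := by
          rw [PySem.Dict.getD_eq_get?_getD, hm, if_pos hlenx]; rfl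
        by_cases hLx : L = PySem.Str.len x
        · rw [hLx, pvMx_snoc_mem p x hx]
          by_cases hlt : m.getD (PySem.Str.len x) 0 < (p.count x : Int) + 1
          · rw [if_pos hlt, PySem.Dict.get?_insert_self, if_pos hlenx]
            rw [hget] at hlt
            congr 1
            omega
          · rw [if_neg hlt, hm]
            rw [hget] at hlt
            simp only [if_pos hlenx]
            congr 1
            omega
        · rw [pvMx_snoc_ne p x L hLx]
          by_cases hlt : m.getD (PySem.Str.len x) 0 < (p.count x : Int) + 1
          · rw [if_pos hlt, PySem.Dict.get?_insert_of_ne _ _ hLx, hm]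
          · rw [if_neg hlt, hm]
      · simp only [if_neg hx]
        rw [pvMx_snoc_not_mem p x hx L, hm]
    have := ih hlen' (p ++ [x])
      ((if x ∈ p then
           (if m.getD (PySem.Str.len x) 0 < (p.count x : Int) + 1
            then m.insert (PySem.Str.len x) ((p.count x : Int) + 1) else m)
         else m)) hm'
    rw [List.foldl_cons, hstep]
    simpa [List.append_assoc] using this

-- ===== VERDICT (by name: the statement is the Claim_ definition above) =====
theorem solution_spec : Claim_equal_solution := by
  intro orders course hdom hpre
  unfold Spec_solution solution solution_alt
  have hlenM : ∀ x ∈ pvCombos orders course, (PySem.Str.len x) ∈ course :=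
    pvCombos_len_mem orders course hpre
  have hm0 : ∀ L : Int,
      (course.foldl (fun d i => d.insert i 0) (PySem.Dict.empty : PySem.Dict Int Int)).get? L =
        if L ∈ course then some (pvMx [] L) else none := by
    intro L; rw [pvMaxLen0_get?]; simp [pvMx]
  obtain ⟨h1, h2⟩ := pvLoop_inv course (pvCombos orders course) hlenM [] _ hm0
  rw [show (PySem.Dict.counter ([] : List String)) = PySem.Dict.empty from rfl] at h1 h2
  rw [List.nil_append] at h1 h2
  dsimp only
  rw [pvFlatten, h1]
  rw [PySem.List.foldl_append_if (f := fun i => i), List.map_id', List.nil_append]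
  rw [PySem.Dict.keys_counter]
  rw [PySem.Dict.foldl_insert_getD_add_one_eq_counter, PySem.Dict.items_counter]
  rw [List.filter_map, List.map_map]
  simp only [Function.comp_def]
  rw [List.map_id']
  rw [pvSorted_filter, pvSorted_filter, List.filter_filter]
  apply List.filter_congr
  intro k hk
  have hkM : k ∈ pvCombos orders course := by
    rw [PySem.List.mem_sorted] at hk
    exact (PySem.Set.mem_ofList _ _).mp hk
  have hlenk := hlenM k hkM
  have hgetm : (List.foldl pvStep
        (PySem.Dict.empty, List.foldl (fun d i => d.insert i 0) PySem.Dict.empty course)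
        (pvCombos orders course)).2.getD (PySem.Str.len k) 0 =
      pvMx (pvCombos orders course) (PySem.Str.len k) := by
    rw [PySem.Dict.getD_eq_get?_getD, h2, if_pos hlenk]; rfl
  rw [hgetm, PySem.Dict.getD_counter]
  by_cases h2c : 2 ≤ (pvCombos orders course).count k
  · have hpoint := pvPoint (pvCombos orders course) k hkM h2c
    rw [Bool.eq_iff_iff]
    simp only [Bool.and_eq_true, beq_iff_eq, decide_eq_true_eq, List.all_eq_true,
      List.mem_filter, List.mem_map, PySem.Set.mem_ofList]
    constructor
    · rintro ⟨heq, -⟩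
      refine ⟨by exact_mod_cast h2c, ?_⟩
      rintro ⟨j, cj⟩ ⟨⟨j', hj', hj'eq⟩, hlenj⟩
      rw [← hj'eq] at hlenj ⊢
      dsimp only at hlenj ⊢
      exact_mod_cast (hpoint.mp (by exact_mod_cast heq)) j' hj' (by exact_mod_cast hlenj)
    · rintro ⟨-, hall⟩
      refine ⟨?_, by exact_mod_cast h2c⟩
      have : ∀ j ∈ pvCombos orders course, PySem.Str.len j = PySem.Str.len k →
          (pvCombos orders course).count j ≤ (pvCombos orders course).count k := by
        intro j hj hlj
        have := hall (j, ((pvCombos orders course).count j : Int)) ⟨⟨j, hj, rfl⟩, by exact_mod_cast hlj⟩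
        simpa using this
      exact_mod_cast hpoint.mpr this
  · rw [Bool.eq_iff_iff]
    simp only [Bool.and_eq_true, decide_eq_true_eq]
    constructor
    · rintro ⟨-, hc⟩
      exact absurd (by exact_mod_cast hc) h2c
    · rintro ⟨hc, -⟩
      exact absurd (by exact_mod_cast hc) h2c
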